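-- pv_equiv track=rewrite | github.com/wlodzimierrr/homelab-portal | backend/app/catalog_reconciliation.py | _choose_primary_service_id
-- ===== SOURCE A (Python) =====
-- from typing import TypedDict
--
-- class CatalogProjectRow(TypedDict, total=False):
--     project_id: str
--     project_name: str
--     env: str
--     namespace: str
--     app_label: str
--
-- class CatalogServiceRow(TypedDict, total=False):
--     service_id: str
--     service_name: str
--     env: str
--     namespace: str
--     app_label: str
--     argo_app_name: str | None
--
-- def _normalize(value: str | None) -> str:
--     safe = (value or "").strip().lower()
--     if not safe:
--         return ""
--     normalized = "".join(ch if ch.isalnum() or ch in "._-" else "-" for ch in safe)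
--     normalized = "-".join(part for part in normalized.split("-") if part)
--     return normalized
--
-- def _sort_service_rows(rows: list[CatalogServiceRow]) -> list[CatalogServiceRow]:
--     return sorted(
--         rows,
--         key=lambda row: (
--             str(row.get("service_id", "")).strip(),
--             str(row.get("namespace", "")).strip(),
--             str(row.get("service_name", "")).strip(),
--         ),
--     )
--
-- def _choose_primary_service_id(
--     project_row: CatalogProjectRow,
--     matched_services: list[CatalogServiceRow],
-- ) -> str | None:
--     if not matched_services:
--         return None
--
--     normalized_project_id = _normalize(str(project_row.get("project_id", "")).strip())
--     for row in matched_services: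
--         service_id = str(row.get("service_id", "")).strip()
--         if _normalize(service_id) == normalized_project_id:
--             return service_id
--
--     return str(_sort_service_rows(matched_services)[0].get("service_id", "")).strip() or None
-- ===== SOURCE B (Python) =====
-- def _normalize(value):
--     safe = (value or "").strip().lower()
--     if not safe:
--         return ""
--     normalized = "".join(ch if ch.isalnum() or ch in "._-" else "-" for ch in safe)
--     normalized = "-".join(part for part in normalized.split("-") if part)
--     return normalized
--
-- def _choose_primary_service_id(project_row, matched_services):
--     if not matched_services:
--         return None
--     target = _normalize(str(project_row.get("project_id", "")).strip())
--     best = None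
--     for row in matched_services:
--         service_id = str(row.get("service_id", "")).strip()
--         if _normalize(service_id) == target:
--             return service_id
--         key = (
--             service_id,
--             str(row.get("namespace", "")).strip(),
--             str(row.get("service_name", "")).strip(),
--         )
--         if best is None or key < best:
--             best = key
--     return best[0] or None
-- ===== Notes on version B (the rewrite author's own statement) =====
-- stated objective: alternative
-- what changed: A scans for a normalized match and then sorts all rows by the (service_id, namespace, service_name) key to take the first; B is a single pass that returns on the first match and otherwise tracks the running minimal key (first wins on ties), so the sort disappears.
import Mathlib
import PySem

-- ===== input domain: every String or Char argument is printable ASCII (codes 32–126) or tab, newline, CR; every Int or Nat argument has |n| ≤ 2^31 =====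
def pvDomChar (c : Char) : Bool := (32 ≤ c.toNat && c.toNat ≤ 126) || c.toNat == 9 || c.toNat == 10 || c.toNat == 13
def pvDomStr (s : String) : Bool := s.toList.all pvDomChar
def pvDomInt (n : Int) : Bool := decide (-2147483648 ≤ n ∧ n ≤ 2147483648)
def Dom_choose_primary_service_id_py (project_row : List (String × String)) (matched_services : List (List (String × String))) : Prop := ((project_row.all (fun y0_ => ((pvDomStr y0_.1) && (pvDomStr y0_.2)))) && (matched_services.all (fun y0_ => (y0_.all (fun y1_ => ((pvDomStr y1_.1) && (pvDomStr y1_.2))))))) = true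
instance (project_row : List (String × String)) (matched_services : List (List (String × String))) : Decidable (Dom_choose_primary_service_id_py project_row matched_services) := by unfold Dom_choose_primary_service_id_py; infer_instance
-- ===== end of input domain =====

-- B fuses A's scan-then-sort into one pass keeping a running minimal (service_id, namespace, service_name) key (objective: alternative — one pass with a running minimum instead of a sort).

-- ===== SHARED MODULE HELPERS (both Pythons use the same _normalize and the same dict.get) =====

-- dict.get(k, d): association list, first match (Python dict keys are unique; first match is exact)
def pvRowGetD (row : List (String × String)) (k d : String) : String :=
  match row.find? (fun p => p.1 == k) with
  | some p => p.2
  | none => d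

-- str(row.get(k, "")).strip()  (str() is the identity on these str values), on the List Char side
def pvStripGet (row : List (String × String)) (k : String) : List Char :=
  PySem.Chars.strip (pvRowGetD row k "").toList

-- _normalize, ported step for step on List Char with the PySem.Chars primitives
def pvNormalize (value : List Char) : List Char :=
  let safe := PySem.Chars.lower (PySem.Chars.strip value)
  if safe = [] then []
  else
    let normalized := safe.map (fun ch =>
      if PySem.Chars.isalnum ch || (ch == '.' || ch == '_' || ch == '-') then ch else '-')
    PySem.Chars.join ['-'] ((PySem.Chars.splitOn normalized ['-']).filter (fun part => !part.isEmpty))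

-- Python's tuple '<' on a 3-tuple of strs: explicit lexicographic compare (PYSEM: tuple keys compare components explicitly)
def pvTLt (a b : List Char × List Char × List Char) : Bool :=
  PySem.Chars.strLt a.1 b.1 ||
    (a.1 == b.1 && (PySem.Chars.strLt a.2.1 b.2.1 ||
      (a.2.1 == b.2.1 && PySem.Chars.strLt a.2.2 b.2.2)))

-- ===== PORT A =====

-- the sort key of _sort_service_rows
def pvKey (row : List (String × String)) : List Char × List Char × List Char :=
  (pvStripGet row "service_id", pvStripGet row "namespace", pvStripGet row "service_name")

-- sorted(rows, key=triple): PySem's stable insertion sort (sorted_eq_foldl_insertBy) with the tuple key compared explicitly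
def pvSortRows (rows : List (List (String × String))) : List (List (String × String)) :=
  rows.foldl (fun acc r => PySem.List.insertBy (fun a b => pvTLt (pvKey a) (pvKey b)) r acc) []

-- A's 'for row in matched_services' first-match loop
def pvALoop (npid : List Char) : List (List (String × String)) → Option String
  | [] => none
  | r :: rs =>
    let sid := pvStripGet r "service_id"
    if pvNormalize sid = npid then some (String.ofList sid) else pvALoop npid rs

def choose_primary_service_id_py (project_row : List (String × String)) (matched_services : List (List (String × String))) : Option String :=
  if matched_services = [] then none
  else
    let npid := pvNormalize (pvStripGet project_row "project_id")
    match pvALoop npid matched_services with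
    | some sid => some sid
    | none =>
      match pvSortRows matched_services with
      | [] => none  -- unreachable: matched_services ≠ []
      | r :: _ =>
        let sid := pvStripGet r "service_id"
        if sid = [] then none else some (String.ofList sid)   -- '… or None'

-- ===== PORT B =====

-- B's single loop: first match returns; otherwise keep the minimal key seen so far (strict '<', so first wins on ties)
def pvBLoop (npid : List Char) (best : Option (List Char × List Char × List Char)) : List (List (String × String)) → Option String
  | [] =>
    match best with
    | none => none  -- unreachable: the caller guarantees a nonempty list
    | some k => if k.1 = [] then none else some (String.ofList k.1)   -- 'best[0] or None'
  | r :: rs =>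
    let sid := pvStripGet r "service_id"
    if pvNormalize sid = npid then some (String.ofList sid)
    else
      let k := (sid, pvStripGet r "namespace", pvStripGet r "service_name")
      pvBLoop npid (some (match best with
        | none => k
        | some b => if pvTLt k b then k else b)) rs

def choose_primary_service_id_py_alt (project_row : List (String × String)) (matched_services : List (List (String × String))) : Option String :=
  if matched_services = [] then none
  else pvBLoop (pvNormalize (pvStripGet project_row "project_id")) none matched_services

-- ===== PRECONDITION & SPEC =====
def Spec_choose_primary_service_id_py (project_row : List (String × String)) (matched_services : List (List (String × String))) (out : Option String) : Prop := out = choose_primary_service_id_py_alt project_row matched_services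
instance (project_row : List (String × String)) (matched_services : List (List (String × String))) (out : Option String) : Decidable (Spec_choose_primary_service_id_py project_row matched_services out) := by unfold Spec_choose_primary_service_id_py; infer_instance

-- ===== CLAIM (what is proved, stated in full; the proofs are below) =====
def Claim_equal_choose_primary_service_id_py : Prop := ∀ (project_row : List (String × String)) (matched_services : List (List (String × String))), Dom_choose_primary_service_id_py project_row matched_services → Spec_choose_primary_service_id_py project_row matched_services (choose_primary_service_id_py project_row matched_services)

-- ===== LEMMAS AND PROOFS =====

-- the triple key, embedded into the lexicographic order on Lex (List Char × Lex (List Char × List Char))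
def pvEmb (k : List Char × List Char × List Char) : Lex ((List Char) × Lex ((List Char) × (List Char))) :=
  toLex (k.1, toLex (k.2.1, k.2.2))

theorem pvTLt_iff (a b : List Char × List Char × List Char) :
    pvTLt a b = true ↔ pvEmb a < pvEmb b := by
  simp [pvTLt, pvEmb, PySem.Chars.strLt, Prod.Lex.lt_iff]

theorem pvTLt_eq_decide (a b : List Char × List Char × List Char) :
    pvTLt a b = decide (pvEmb a < pvEmb b) := by
  by_cases h : pvEmb a < pvEmb b
  · simp [h, (pvTLt_iff a b).mpr h]
  · rw [decide_eq_false h]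
    exact Bool.eq_false_iff.mpr (fun hc => h ((pvTLt_iff a b).mp hc))

theorem pvEmb_inj {a b : List Char × List Char × List Char} (h : pvEmb a = pvEmb b) : a = b := by
  obtain ⟨a1, a2, a3⟩ := a
  obtain ⟨b1, b2, b3⟩ := b
  simpa [pvEmb, Prod.ext_iff] using h

-- "k is a minimal key of L, in the lex order"
def pvIsMin (L : List (List Char × List Char × List Char)) (k : List Char × List Char × List Char) : Prop :=
  k ∈ L ∧ ∀ x ∈ L, pvEmb k ≤ pvEmb x

theorem pvIsMin_unique {L : List (List Char × List Char × List Char)} {k k'}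
    (h : pvIsMin L k) (h' : pvIsMin L k') : k = k' := by
  exact pvEmb_inj (le_antisymm (h.2 k' h'.1) (h'.2 k h.1))

-- B's running minimum as a fold
def pvFoldMin (ms : List (List (String × String))) (b : List Char × List Char × List Char) :
    List Char × List Char × List Char :=
  ms.foldl (fun b r => if pvTLt (pvKey r) b then pvKey r else b) b

theorem pvFoldMin_isMin (ms : List (List (String × String))) (b : List Char × List Char × List Char) :
    pvIsMin (b :: ms.map pvKey) (pvFoldMin ms b) := by
  induction ms generalizing b with
  | nil => exact ⟨List.mem_singleton.mpr rfl, by intro x hx; simp at hx; simp [hx, pvFoldMin]⟩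
  | cons r rs ih =>
    have step : pvFoldMin (r :: rs) b = pvFoldMin rs (if pvTLt (pvKey r) b then pvKey r else b) := rfl
    set b' := if pvTLt (pvKey r) b then pvKey r else b with hb'
    have hb'b : pvEmb b' ≤ pvEmb b := by
      by_cases h : pvTLt (pvKey r) b = true
      · simp only [hb', h, if_true]; exact le_of_lt ((pvTLt_iff _ _).mp h)
      · simp [hb', h]
    have hb'r : pvEmb b' ≤ pvEmb (pvKey r) := by
      by_cases h : pvTLt (pvKey r) b = true
      · simp [hb', h]
      · simp only [hb', h]
        exact le_of_not_gt (fun hlt => h ((pvTLt_iff _ _).mpr hlt))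
    obtain ⟨hmem, hmin⟩ := ih b'
    have hle : pvEmb (pvFoldMin rs b') ≤ pvEmb b' := hmin b' (List.mem_cons_self ..)
    constructor
    · rw [step]
      rcases List.mem_cons.mp hmem with h | h
      · rw [h, hb']
        by_cases hc : pvTLt (pvKey r) b = true
        · simp [hc]
        · simp [hc]
      · exact List.mem_cons_of_mem _ (List.mem_cons_of_mem _ (by simpa using h))
    · intro x hx
      rw [step]
      rcases List.mem_cons.mp hx with h | h
      · exact h ▸ le_trans (le_trans hle hb'b) (le_refl _)
      rcases List.mem_cons.mp h with h | h
      · exact h ▸ le_trans hle hb'r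
      · exact hmin x (List.mem_cons_of_mem _ h)

-- A's hand-sorted rows ARE PySem's sorted with the embedded key
theorem pvSortRows_eq_sorted (ms : List (List (String × String))) :
    pvSortRows ms = PySem.List.sorted ms (fun r => pvEmb (pvKey r)) false := by
  rw [PySem.List.sorted_eq_foldl_insertBy]
  unfold pvSortRows
  congr 1
  funext acc r
  congr 1
  funext a b
  exact pvTLt_eq_decide (pvKey a) (pvKey b)

-- the head of A's sorted fallback list carries a minimal key
theorem pvSortRows_head_isMin (ms : List (List (String × String))) (hne : ms ≠ []) :
    ∃ r t, pvSortRows ms = r :: t ∧ pvIsMin (ms.map pvKey) (pvKey r) := by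
  rcases hs : pvSortRows ms with _ | ⟨r, t⟩
  · exfalso
    have := PySem.List.sorted_perm ms (fun r => pvEmb (pvKey r)) false
    rw [← pvSortRows_eq_sorted, hs] at this
    exact hne (this.nil_eq.symm ▸ rfl)
  · refine ⟨r, t, rfl, ?_, ?_⟩
    · have := PySem.List.sorted_perm ms (fun r => pvEmb (pvKey r)) false
      rw [← pvSortRows_eq_sorted, hs] at this
      exact List.mem_map_of_mem (this.mem_iff.mp (List.mem_cons_self ..))
    · intro x hx
      obtain ⟨y, hy, rfl⟩ := List.mem_map.mp hx
      exact PySem.List.key_head_sorted_le ms (fun r => pvEmb (pvKey r))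
        (by rw [← pvSortRows_eq_sorted]; exact hs) y hy

-- B's loop, after a seed key, is A's first-match loop with the fold-minimum fallback
theorem pvBLoop_eq (npid : List Char) (ms : List (List (String × String))) :
    ∀ b, pvBLoop npid (some b) ms =
      match pvALoop npid ms with
      | some s => some s
      | none =>
        let k := pvFoldMin ms b
        if k.1 = [] then none else some (String.ofList k.1) := by
  induction ms with
  | nil => intro b; rfl
  | cons r rs ih =>
    intro b
    show (if pvNormalize (pvStripGet r "service_id") = npid then _ else _) = _
    by_cases h : pvNormalize (pvStripGet r "service_id") = npid
    · simp only [pvALoop, h, if_true]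
    · simp only [pvALoop, h, if_false]
      have : pvFoldMin (r :: rs) b = pvFoldMin rs (if pvTLt (pvKey r) b then pvKey r else b) := rfl
      rw [this, ← ih]
      rfl

-- ===== VERDICT (by name: the statement is the Claim_ definition above) =====
theorem choose_primary_service_id_py_spec : Claim_equal_choose_primary_service_id_py := by
  intro project_row matched_services _
  unfold Spec_choose_primary_service_id_py
  unfold choose_primary_service_id_py choose_primary_service_id_py_alt
  by_cases hms : matched_services = []
  · simp [hms]
  · simp only [hms, if_false]
    rcases matched_services with _ | ⟨r, rs⟩
    · exact absurd rfl hms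
    set npid := pvNormalize (pvStripGet project_row "project_id") with hnpid
    show _ = pvBLoop npid none (r :: rs)
    by_cases h : pvNormalize (pvStripGet r "service_id") = npid
    · -- the first row already matches: both sides return its stripped service id
      have ha : pvALoop npid (r :: rs) = some (String.ofList (pvStripGet r "service_id")) := by
        simp [pvALoop, h]
      have hb : pvBLoop npid none (r :: rs) = some (String.ofList (pvStripGet r "service_id")) := by
        show (if pvNormalize (pvStripGet r "service_id") = npid then _ else _) = _
        rw [if_pos h]
      rw [ha, hb]
    · have hb : pvBLoop npid none (r :: rs) = pvBLoop npid (some (pvKey r)) rs := by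
        show (if pvNormalize (pvStripGet r "service_id") = npid then _ else _) = _
        rw [if_neg h]
        rfl
      have ha : pvALoop npid (r :: rs) = pvALoop npid rs := by
        simp [pvALoop, h]
      rw [hb, pvBLoop_eq, ha]
      cases hal : pvALoop npid rs with
      | some s => rfl
      | none =>
        -- no match anywhere: A's sorted-head key equals B's fold minimum
        obtain ⟨r', t, hs, hmin⟩ := pvSortRows_head_isMin (r :: rs) hms
        have hmin' : pvIsMin ((r :: rs).map pvKey) (pvFoldMin rs (pvKey r)) := by
          simpa using pvFoldMin_isMin rs (pvKey r)
        have hk : pvKey r' = pvFoldMin rs (pvKey r) := pvIsMin_unique hmin hmin'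
        simp only [hs, ← hk]
        rfl
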